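-- pv_equiv track=rewrite | github.com/jackyeung99/Applied_Algorithms | Assignment05/Assignment05_practical.py | influencer_network
-- ===== SOURCE A (Python) =====
-- from collections import deque, defaultdict
--
-- def influencer_network(n:int, connections:list[list[int]]) -> list[list[int]]:
--
--     # flip direction keeping track of every neighbor that influences a node
--     adj_dict = defaultdict(list)
--     for i, j in connections:
--         adj_dict[j].append(i)
--
--
--     # perform bfs on reversed dict
--     # avoid computation on previously visited nodes
--     # if influenced by 0 also influenced by every node inluencing 0
--     affected = {}
--     def influenced_bfs(start):
--         if start in affected:
--             return affected[start]
--
--         influenced_by = set()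
--
--         queue = deque([start])
--         while queue:
--             node = queue.popleft()
--
--             for neighbor in adj_dict[node]:
--                 if neighbor not in influenced_by:
--                     influenced_by.add(neighbor)
--                     if neighbor in affected:
--                         influenced_by.update(affected[neighbor])
--                     else:
--                         queue.append(neighbor)
--
--
--         affected[start] = sorted(set(influenced_by))
--         return affected[start]
--
--
--     results = [influenced_bfs(i) for i in range(n)]
--     return results
-- ===== SOURCE B (Python) =====
-- def influencer_network(n: int, connections: list[list[int]]) -> list[list[int]]:
--     # Bellman-Ford-style global propagation: sweep all edges len(connections) times,
--     # growing ancestor sets simultaneously; no per-node BFS, no memoisation.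
--     anc = {}
--     for _ in range(len(connections)):
--         for i, j in connections:
--             anc[j] = anc.get(j, set()) | anc.get(i, set()) | {i}
--     return [sorted(anc.get(v, set())) for v in range(n)]
-- ===== Notes on version B (the rewrite author's own statement) =====
-- stated objective: alternative
-- what changed: Replaces the per-node memoized BFS over a reversed adjacency dict with a global Bellman-Ford-style fixed number of edge sweeps that grow all ancestor sets simultaneously until saturation.
import Mathlib
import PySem

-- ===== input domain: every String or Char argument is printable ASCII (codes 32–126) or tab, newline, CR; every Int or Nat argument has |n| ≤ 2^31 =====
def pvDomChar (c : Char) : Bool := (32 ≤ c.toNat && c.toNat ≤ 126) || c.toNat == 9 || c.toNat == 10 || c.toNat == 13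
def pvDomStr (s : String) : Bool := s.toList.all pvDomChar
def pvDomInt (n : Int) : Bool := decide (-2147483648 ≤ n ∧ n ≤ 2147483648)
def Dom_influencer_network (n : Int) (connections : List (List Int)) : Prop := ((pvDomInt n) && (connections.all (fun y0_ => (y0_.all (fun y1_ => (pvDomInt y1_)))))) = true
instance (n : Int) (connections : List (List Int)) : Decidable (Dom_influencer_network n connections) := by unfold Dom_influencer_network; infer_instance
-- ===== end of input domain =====

-- B replaces A's per-node memoized BFS by a global Bellman-Ford-style edge-sweep saturation; same results, no speed claim.

-- ===== PORT A =====
-- adj_dict[j].append(i) on a defaultdict(list)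
def pvAdjUpd (d : PySem.Dict Int (List Int)) (c : List Int) : PySem.Dict Int (List Int) :=
  match c with
  | [i, j] => d.modify j [] (fun l => l ++ [i])
  | _ => d   -- Python raises ValueError on unpacking; excluded by Pre_

-- body of 'for neighbor in adj_dict[node]': state = (influenced_by, queue)
def pvInnerStep (aff : PySem.Dict Int (List Int)) (s : PySem.Set Int × List Int) (nb : Int) :
    PySem.Set Int × List Int :=
  if nb ∈ s.1 then s
  else
    match aff.get? nb with
    | some w => (PySem.Set.update (PySem.Set.add s.1 nb) w, s.2)
    | none => (PySem.Set.add s.1 nb, s.2 ++ [nb])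

-- 'while queue:' loop; fuel only makes the recursion structural (proved never exhausted)
def pvBfsLoop (adj aff : PySem.Dict Int (List Int)) :
    Nat → List Int → PySem.Set Int → PySem.Set Int
  | 0, _, inf => inf
  | _ + 1, [], inf => inf
  | fuel + 1, node :: rest, inf =>
    let s := (adj.getD node []).foldl (pvInnerStep aff) (inf, rest)
    pvBfsLoop adj aff fuel s.2 s.1

def pvInfluencedBfs (adj aff : PySem.Dict Int (List Int)) (fuel : Nat) (start : Int) :
    List Int × PySem.Dict Int (List Int) :=
  match aff.get? start with
  | some v => (v, aff)
  | none =>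
    let inf := pvBfsLoop adj aff fuel [start] PySem.Set.empty
    let r := PySem.List.sorted (PySem.Set.ofList inf) (fun x => x) false
    (r, aff.insert start r)

def influencer_network (n : Int) (connections : List (List Int)) : List (List Int) :=
  let adj := connections.foldl pvAdjUpd PySem.Dict.empty
  ((PySem.List.pyRange 0 n 1).foldl
    (fun acc i =>
      let p := pvInfluencedBfs adj acc.2 (connections.length + 2) i
      (acc.1 ++ [p.1], p.2))
    (([] : List (List Int)), PySem.Dict.empty)).1

-- ===== PORT B =====
-- anc[j] = anc.get(j, set()) | anc.get(i, set()) | {i}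
def pvSweepEdge (anc : PySem.Dict Int (PySem.Set Int)) (c : List Int) :
    PySem.Dict Int (PySem.Set Int) :=
  match c with
  | [i, j] =>
    anc.insert j
      (PySem.Set.add (PySem.Set.union (anc.getD j PySem.Set.empty) (anc.getD i PySem.Set.empty)) i)
  | _ => anc   -- Python raises ValueError on unpacking; excluded by Pre_

def influencer_network_alt (n : Int) (connections : List (List Int)) : List (List Int) :=
  let anc := (List.range connections.length).foldl
    (fun a _ => connections.foldl pvSweepEdge a) PySem.Dict.empty
  (PySem.List.pyRange 0 n 1).map
    (fun v => PySem.List.sorted (anc.getD v PySem.Set.empty) (fun x => x) false)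

-- ===== PRECONDITION & SPEC =====
-- Pre_ excludes exactly the inputs where both Pythons raise ValueError: an edge that is not a pair.
def Pre_influencer_network (n : Int) (connections : List (List Int)) : Prop :=
  ∀ c ∈ connections, c.length = 2
instance (n : Int) (connections : List (List Int)) : Decidable (Pre_influencer_network n connections) := by
  unfold Pre_influencer_network; infer_instance

def pvWitness_influencer_network : Int × List (List Int) := (3, [[0, 1], [1, 2], [2, 0]])

def Spec_influencer_network (n : Int) (connections : List (List Int)) (out : List (List Int)) : Prop :=
  out = influencer_network_alt n connections
instance (n : Int) (connections : List (List Int)) (out : List (List Int)) : Decidable (Spec_influencer_network n connections out) := by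
  unfold Spec_influencer_network; infer_instance

-- ===== CLAIM (what is proved, stated in full; the proofs are below) =====
def Claim_equal_influencer_network : Prop := ∀ (n : Int) (connections : List (List Int)), Dom_influencer_network n connections → Pre_influencer_network n connections → Spec_influencer_network n connections (influencer_network n connections)

-- ===== LEMMAS AND PROOFS =====

-- x directly influences a: the edge [x, a] is present
def pvStep (conns : List (List Int)) (a x : Int) : Prop := [x, a] ∈ conns

-- x transitively influences a
def pvAnc (conns : List (List Int)) (a x : Int) : Prop := Relation.TransGen (pvStep conns) a x

-- a backward chain a ← b₁ ← b₂ ← … through edges of conns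
def pvChain (conns : List (List Int)) : Int → List Int → Prop
  | _, [] => True
  | a, b :: l => [b, a] ∈ conns ∧ pvChain conns b l

def pvSrcs (conns : List (List Int)) : List Int := conns.filterMap List.head?

def pvUnseen (conns : List (List Int)) (V : List Int) : Nat :=
  (pvSrcs conns).countP (fun z => !decide (z ∈ V))

def pvAg (anc : PySem.Dict Int (PySem.Set Int)) (j : Int) : PySem.Set Int :=
  anc.getD j PySem.Set.empty

def pvMemoInv (conns : List (List Int)) (aff : PySem.Dict Int (List Int)) : Prop :=
  ∀ k v, aff.get? k = some v →
    ∃ u : List Int, u.Nodup ∧ (∀ x, x ∈ u ↔ pvAnc conns k x) ∧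
      v = PySem.List.sorted u (fun x => x) false

lemma pv_sorted_eq_of_mem_iff {u w : List Int} (hu : u.Nodup) (hw : w.Nodup)
    (h : ∀ x, x ∈ u ↔ x ∈ w) :
    PySem.List.sorted u (fun x => x) false = PySem.List.sorted w (fun x => x) false := by
  rw [PySem.List.sorted_id_eq_sorted_id_iff_perm]
  exact (List.perm_ext_iff_of_nodup hu hw).mpr h

-- ----- B side -----
lemma pvSweepEdge_mono (anc : PySem.Dict Int (PySem.Set Int)) (c : List Int) (j : Int) (x : Int)
    (h : x ∈ pvAg anc j) : x ∈ pvAg (pvSweepEdge anc c) j := by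
  unfold pvSweepEdge
  split
  · next i k =>
    unfold pvAg at *
    rw [PySem.Dict.getD_insert]
    split
    · next hj =>
      subst hj
      exact (PySem.Set.mem_add _ _ _).mpr (Or.inl ((PySem.Set.mem_union _ _ _).mpr (Or.inl h)))
    · exact h
  · exact h

lemma pvSweep_foldl_mono (l : List (List Int)) (anc : PySem.Dict Int (PySem.Set Int)) (j x : Int)
    (h : x ∈ pvAg anc j) : x ∈ pvAg (l.foldl pvSweepEdge anc) j := by
  induction l generalizing anc with
  | nil => exact h
  | cons c l ih => exact ih _ (pvSweepEdge_mono anc c j x h)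

def pvSound (conns : List (List Int)) (anc : PySem.Dict Int (PySem.Set Int)) : Prop :=
  ∀ j y, y ∈ pvAg anc j → pvAnc conns j y

def pvNodups (anc : PySem.Dict Int (PySem.Set Int)) : Prop := ∀ j, (pvAg anc j).Nodup

lemma pvSound_foldl (conns l : List (List Int)) (anc : PySem.Dict Int (PySem.Set Int))
    (hl : ∀ c ∈ l, c ∈ conns) (h : pvSound conns anc) :
    pvSound conns (l.foldl pvSweepEdge anc) := by
  induction l generalizing anc with
  | nil => exact h
  | cons c l ih =>
    refine ih _ (fun c' hc' => hl c' (List.mem_cons_of_mem _ hc')) ?_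
    have hc : c ∈ conns := hl c (List.mem_cons_self ..)
    intro j y hy
    unfold pvSweepEdge at hy
    revert hy
    split
    · next i k =>
      unfold pvAg
      rw [PySem.Dict.getD_insert]
      split
      · next hj =>
        subst hj
        intro hy
        rcases (PySem.Set.mem_add _ _ _).mp hy with hy | hy
        · rcases (PySem.Set.mem_union _ _ _).mp hy with hy | hy
          · exact h _ _ hy
          · exact Relation.TransGen.head hc (h _ _ hy)
        · subst hy
          exact Relation.TransGen.single hc
      · exact fun hy => h _ _ hy
    · exact fun hy => h _ _ hy

lemma pvNodups_foldl (l : List (List Int)) (anc : PySem.Dict Int (PySem.Set Int))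
    (h : pvNodups anc) : pvNodups (l.foldl pvSweepEdge anc) := by
  induction l generalizing anc with
  | nil => exact h
  | cons c l ih =>
    refine ih _ ?_
    intro j
    unfold pvSweepEdge
    split
    · next i k =>
      unfold pvAg
      rw [PySem.Dict.getD_insert]
      split
      · exact PySem.Set.nodup_add _ _ (PySem.Set.nodup_union _ _ (h _))
      · exact h _
    · exact h j

-- every chain of length ≤ t is already recorded
def pvDeep (conns : List (List Int)) (t : Nat) (anc : PySem.Dict Int (PySem.Set Int)) : Prop :=
  ∀ a l y, pvChain conns a l → l.getLast? = some y → l.length ≤ t → y ∈ pvAg anc a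

lemma pvDeep_succ (conns : List (List Int)) (t : Nat) (anc : PySem.Dict Int (PySem.Set Int))
    (h : pvDeep conns t anc) : pvDeep conns (t + 1) (conns.foldl pvSweepEdge anc) := by
  intro a l y hch hl hlen
  match l with
  | [] => simp at hl
  | b :: l' =>
    obtain ⟨hedge, hch'⟩ := hch
    obtain ⟨c₁, c₂, hc⟩ := List.append_of_mem hedge
    rw [hc, List.foldl_append, List.foldl_cons]
    apply pvSweep_foldl_mono
    have hmid : ∀ j x, x ∈ pvAg anc j → x ∈ pvAg (c₁.foldl pvSweepEdge anc) j :=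
      fun j x hx => pvSweep_foldl_mono c₁ anc j x hx
    show y ∈ pvAg (pvSweepEdge (c₁.foldl pvSweepEdge anc) [b, a]) a
    unfold pvSweepEdge pvAg
    simp only [PySem.Dict.getD_insert, if_true]
    rw [PySem.Set.mem_add]
    match l' with
    | [] =>
      simp only [List.getLast?_singleton, Option.some.injEq] at hl
      exact Or.inr hl.symm
    | b' :: l'' =>
      left
      rw [PySem.Set.mem_union]
      right
      apply hmid
      refine h b (b' :: l'') y hch' ?_ ?_
      · rw [List.getLast?_cons_cons] at hl; exact hl
      · simp only [List.length_cons] at hlen ⊢; omega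

def pvSweeps (conns : List (List Int)) (k : Nat) : PySem.Dict Int (PySem.Set Int) :=
  (List.range k).foldl (fun a _ => conns.foldl pvSweepEdge a) PySem.Dict.empty

lemma pvSweeps_deep (conns : List (List Int)) (k : Nat) : pvDeep conns k (pvSweeps conns k) := by
  induction k with
  | zero =>
    intro a l y _ hl hlen
    interval_cases hh : l.length
    · rw [List.length_eq_zero_iff] at hh; subst hh; simp at hl
  | succ k ih =>
    unfold pvSweeps at *
    rw [List.range_succ, List.foldl_append, List.foldl_cons, List.foldl_nil]
    exact pvDeep_succ conns k _ ih

lemma pvSweeps_sound (conns : List (List Int)) (k : Nat) : pvSound conns (pvSweeps conns k) := by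
  induction k with
  | zero =>
    intro j y hy
    unfold pvSweeps pvAg at hy
    simp [PySem.Dict.getD_empty, PySem.Set.empty] at hy
  | succ k ih =>
    unfold pvSweeps at *
    rw [List.range_succ, List.foldl_append, List.foldl_cons, List.foldl_nil]
    exact pvSound_foldl conns conns _ (fun c hc => hc) ih

lemma pvSweeps_nodups (conns : List (List Int)) (k : Nat) : pvNodups (pvSweeps conns k) := by
  induction k with
  | zero =>
    intro j
    unfold pvSweeps pvAg
    simp [PySem.Dict.getD_empty, PySem.Set.empty]
  | succ k ih =>
    unfold pvSweeps at *
    rw [List.range_succ, List.foldl_append, List.foldl_cons, List.foldl_nil]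
    exact pvNodups_foldl conns _ ih

lemma pvChain_suffix (conns : List (List Int)) (l₁ l₂ : List Int) (a b : Int)
    (h : pvChain conns a (l₁ ++ b :: l₂)) : pvChain conns b l₂ := by
  induction l₁ generalizing a with
  | nil => exact h.2
  | cons x l₁ ih => exact ih x h.2

lemma pvChain_elems (conns : List (List Int)) (a : Int) (l : List Int)
    (h : pvChain conns a l) : ∀ x ∈ l, x ∈ pvSrcs conns := by
  induction l generalizing a with
  | nil => intro x hx; simp at hx
  | cons b l ih =>
    intro x hx
    rcases List.mem_cons.mp hx with hx | hx
    · subst hx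
      exact List.mem_filterMap.mpr ⟨[x, a], h.1, rfl⟩
    · exact ih b h.2 x hx

lemma pvChain_append (conns : List (List Int)) (a b y : Int) (l : List Int)
    (h : pvChain conns a l) (hb : l.getLast? = some b) (he : [y, b] ∈ conns) :
    pvChain conns a (l ++ [y]) ∧ (l ++ [y]).getLast? = some y := by
  induction l generalizing a with
  | nil => simp at hb
  | cons b₀ l ih =>
    match l with
    | [] =>
      simp only [List.getLast?_singleton, Option.some.injEq] at hb
      subst hb
      exact ⟨⟨h.1, he, trivial⟩, by simp⟩
    | b₁ :: l' =>
      rw [List.getLast?_cons_cons] at hb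
      obtain ⟨h1, h2⟩ := ih b₀ h.2 hb
      exact ⟨⟨h.1, h1⟩, by simpa using h2⟩

lemma pv_getLast?_cons_of_ne_nil {t : List Int} (b : Int) (h : t ≠ []) :
    (b :: t).getLast? = t.getLast? := by
  cases t with
  | nil => simp at h
  | cons x t => exact List.getLast?_cons_cons

lemma pvChain_shorten (conns : List (List Int)) :
    ∀ N l (a y : Int), l.length ≤ N → pvChain conns a l → l.getLast? = some y →
    ∃ l', l'.Nodup ∧ l' ⊆ l ∧ pvChain conns a l' ∧ l'.getLast? = some y := by
  intro N
  induction N with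
  | zero =>
    intro l a y hlen hch hl
    rw [Nat.le_zero, List.length_eq_zero_iff] at hlen
    subst hlen; simp at hl
  | succ N ih =>
    intro l a y hlen hch hl
    match l with
    | [] => simp at hl
    | b :: t =>
      by_cases hb : b ∈ t
      · obtain ⟨t₁, t₂, ht⟩ := List.append_of_mem hb
        subst ht
        have hch2 : pvChain conns a (b :: t₂) := ⟨hch.1, pvChain_suffix conns t₁ t₂ b b hch.2⟩
        have hl2 : (b :: t₂).getLast? = some y := by
          rw [pv_getLast?_cons_of_ne_nil _ (by simp), List.getLast?_append_of_ne_nil _ (by simp)] at hl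
          exact hl
        have hlen2 : (b :: t₂).length ≤ N := by
          simp only [List.length_cons, List.length_append] at hlen ⊢; omega
        obtain ⟨l', h1, h2, h3, h4⟩ := ih (b :: t₂) a y hlen2 hch2 hl2
        refine ⟨l', h1, ?_, h3, h4⟩
        intro x hx
        rcases List.mem_cons.mp (h2 hx) with hx' | hx'
        · exact hx' ▸ List.mem_cons_self ..
        · exact List.mem_cons_of_mem _ (List.mem_append_right _ (List.mem_cons_of_mem _ hx'))
      · match t with
        | [] =>
          simp only [List.getLast?_singleton, Option.some.injEq] at hl
          exact ⟨[b], by simp, by simp, hch, by simp [hl]⟩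
        | t₀ :: t' =>
          rw [pv_getLast?_cons_of_ne_nil _ (by simp)] at hl
          obtain ⟨l', h1, h2, h3, h4⟩ := ih (t₀ :: t') b y (by simpa using hlen) hch.2 hl
          have hbl' : b ∉ l' := fun hmem => hb (h2 hmem)
          refine ⟨b :: l', List.nodup_cons.mpr ⟨hbl', h1⟩, ?_, ⟨hch.1, h3⟩, ?_⟩
          · intro x hx
            rcases List.mem_cons.mp hx with hx' | hx'
            · exact hx' ▸ List.mem_cons_self ..
            · exact List.mem_cons_of_mem _ (h2 hx')
          · rw [pv_getLast?_cons_of_ne_nil _ (by intro hnil; rw [hnil] at h4; simp at h4)]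
            exact h4

lemma pvAnc_iff_chain (conns : List (List Int)) (a y : Int) :
    pvAnc conns a y ↔ ∃ l, pvChain conns a l ∧ l.getLast? = some y := by
  constructor
  · intro htg
    induction htg with
    | @single b hr => exact ⟨[b], ⟨hr, trivial⟩, by simp⟩
    | @tail b c _ hstep ih =>
      obtain ⟨l, hch, hl⟩ := ih
      obtain ⟨h1, h2⟩ := pvChain_append conns a b c l hch hl hstep
      exact ⟨l ++ [c], h1, h2⟩
  · rintro ⟨l, hch, hl⟩
    induction l generalizing a with
    | nil => simp at hl
    | cons b t ih =>
      match t with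
      | [] =>
        simp only [List.getLast?_singleton, Option.some.injEq] at hl
        subst hl
        exact Relation.TransGen.single hch.1
      | t₀ :: t' =>
        rw [pv_getLast?_cons_of_ne_nil _ (by simp)] at hl
        exact Relation.TransGen.head hch.1 (ih b hch.2 hl)

-- the saturated map of port B has exactly the transitive influencers
lemma pvAlt_entry (conns : List (List Int)) (v : Int) :
    (pvAg (pvSweeps conns conns.length) v).Nodup ∧
    (∀ y, y ∈ pvAg (pvSweeps conns conns.length) v ↔ pvAnc conns v y) := by
  refine ⟨pvSweeps_nodups conns conns.length v, fun y => ⟨fun hy => pvSweeps_sound conns conns.length v y hy, fun hanc => ?_⟩⟩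
  obtain ⟨l, hch, hl⟩ := (pvAnc_iff_chain conns v y).mp hanc
  obtain ⟨l', h1, h2, h3, h4⟩ := pvChain_shorten conns l.length l v y le_rfl hch hl
  have hsub : l' ⊆ pvSrcs conns := fun x hx => pvChain_elems conns v l' h3 x hx
  have hlen : l'.length ≤ conns.length := by
    calc l'.length = l'.toFinset.card := (List.toFinset_card_of_nodup h1).symm
      _ ≤ (pvSrcs conns).toFinset.card :=
        Finset.card_le_card (fun x hx => List.mem_toFinset.mpr (hsub (List.mem_toFinset.mp hx)))
      _ ≤ (pvSrcs conns).length := List.toFinset_card_le _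
      _ ≤ conns.length := List.length_filterMap_le _ _
  exact pvSweeps_deep conns conns.length v l' y h3 h4 hlen

-- ----- A side -----
lemma pvAdj_mem (conns : List (List Int)) (hpre : ∀ c ∈ conns, c.length = 2) :
    ∀ (d : PySem.Dict Int (List Int)) (j x : Int),
      x ∈ (conns.foldl pvAdjUpd d).getD j [] ↔ x ∈ d.getD j [] ∨ [x, j] ∈ conns := by
  induction conns with
  | nil => intro d j x; simp
  | cons c l ih =>
    intro d j x
    have hc2 : c.length = 2 := hpre c (List.mem_cons_self ..)
    match c, hc2 with
    | [i, jj], _ =>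
      rw [List.foldl_cons]
      have hupd : pvAdjUpd d [i, jj] = d.modify jj [] (fun l => l ++ [i]) := rfl
      rw [hupd, ih (fun c' hc' => hpre c' (List.mem_cons_of_mem _ hc')) _ j x]
      rw [PySem.Dict.getD_modify]
      constructor
      · rintro (h | h)
        · split at h
          · next hj =>
            subst hj
            rcases List.mem_append.mp h with h | h
            · exact Or.inl h
            · simp only [List.mem_singleton] at h
              subst h
              exact Or.inr (List.mem_cons_self ..)
          · exact Or.inl h
        · exact Or.inr (List.mem_cons_of_mem _ h)
      · rintro (h | h)
        · left
          split
          · next hj => subst hj; exact List.mem_append_left _ h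
          · exact h
        · rcases List.mem_cons.mp h with h | h
          · have : x = i ∧ j = jj := by simpa using h
            obtain ⟨rfl, rfl⟩ := this
            left
            rw [if_pos rfl]
            exact List.mem_append_right _ (List.mem_singleton.mpr rfl)
          · exact Or.inr h

lemma pvCountP_lt {α : Type} (l : List α) (p q : α → Bool)
    (h : ∀ x ∈ l, p x = true → q x = true) (a : α) (ha : a ∈ l) (hqa : q a = true)
    (hpa : p a = false) : l.countP p < l.countP q := by
  induction l with
  | nil => simp at ha
  | cons x t ih =>
    rw [List.countP_cons, List.countP_cons]
    rcases List.mem_cons.mp ha with hax | hat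
    · subst hax
      rw [hpa, hqa]
      simp only [Bool.false_eq_true, if_false, if_true]
      have := List.countP_mono_left (l := t) (fun z hz => h z (List.mem_cons_of_mem _ hz))
      omega
    · have hlt := ih (fun z hz hp => h z (List.mem_cons_of_mem _ hz) hp) hat
      by_cases hx : p x = true
      · rw [if_pos hx, if_pos (h x (List.mem_cons_self ..) hx)]
        omega
      · rw [if_neg hx]
        by_cases hx' : q x = true
        · rw [if_pos hx']; omega
        · rw [if_neg hx']; omega

lemma pvInner_spec (conns : List (List Int)) (aff : PySem.Dict Int (List Int))
    (start node : Int) (hmemo : pvMemoInv conns aff)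
    (hnode : ∀ z, [z, node] ∈ conns → pvAnc conns start z) :
    ∀ (ns : List Int) (V : PySem.Set Int) (q : List Int), V.Nodup →
      (∀ z ∈ ns, [z, node] ∈ conns) →
      (∀ x ∈ V, x ∈ (ns.foldl (pvInnerStep aff) (V, q)).1) ∧
      (ns.foldl (pvInnerStep aff) (V, q)).1.Nodup ∧
      (∀ x ∈ (ns.foldl (pvInnerStep aff) (V, q)).1, x ∈ V ∨ pvAnc conns start x) ∧
      (∀ z ∈ ns, z ∈ (ns.foldl (pvInnerStep aff) (V, q)).1) ∧
      (∀ x ∈ (ns.foldl (pvInnerStep aff) (V, q)).2, x ∈ q ∨ x ∈ (ns.foldl (pvInnerStep aff) (V, q)).1) ∧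
      (∀ x ∈ q, x ∈ (ns.foldl (pvInnerStep aff) (V, q)).2) ∧
      (∀ x ∈ (ns.foldl (pvInnerStep aff) (V, q)).1,
        x ∈ V ∨ x ∈ (ns.foldl (pvInnerStep aff) (V, q)).2 ∨
          (∀ z, [z, x] ∈ conns → z ∈ (ns.foldl (pvInnerStep aff) (V, q)).1)) ∧
      ((ns.foldl (pvInnerStep aff) (V, q)).2.length + pvUnseen conns (ns.foldl (pvInnerStep aff) (V, q)).1
        ≤ q.length + pvUnseen conns V) := by
  intro ns
  induction ns with
  | nil =>
    intro V q hnodup _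
    simp only [List.foldl_nil]
    exact ⟨fun x hx => hx, hnodup, fun x hx => Or.inl hx, by simp,
      fun x hx => Or.inl hx, fun x hx => hx,
      fun x hx => Or.inl hx, le_rfl⟩
  | cons nb ns ih =>
    intro V q hnodup hns
    rw [List.foldl_cons]
    have hnbedge : [nb, node] ∈ conns := hns nb (List.mem_cons_self ..)
    have hancnb : pvAnc conns start nb := hnode nb hnbedge
    have hns' : ∀ z ∈ ns, [z, node] ∈ conns := fun z hz => hns z (List.mem_cons_of_mem _ hz)
    by_cases hmem : nb ∈ V
    · have hstepeq : pvInnerStep aff (V, q) nb = (V, q) := by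
        unfold pvInnerStep; rw [if_pos hmem]
      rw [hstepeq]
      obtain ⟨c1, c2, c3, c4, c5, c6, c7, c8⟩ := ih V q hnodup hns'
      refine ⟨c1, c2, c3, ?_, c5, c6, c7, c8⟩
      intro z hz
      rcases List.mem_cons.mp hz with hz' | hz'
      · exact hz' ▸ c1 nb hmem
      · exact c4 z hz'
    · cases haff : aff.get? nb with
      | some w =>
        have hstepeq : pvInnerStep aff (V, q) nb =
            (PySem.Set.update (PySem.Set.add V nb) w, q) := by
          unfold pvInnerStep; rw [if_neg hmem, haff]
        rw [hstepeq]
        obtain ⟨u, hu, huiff, hwu⟩ := hmemo nb w haff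
        have hwmem : ∀ x, x ∈ w ↔ pvAnc conns nb x := by
          intro x
          rw [hwu, PySem.List.mem_sorted]
          exact huiff x
        set V₁ := PySem.Set.update (PySem.Set.add V nb) w with hV₁
        have hmemV₁ : ∀ x, x ∈ V₁ ↔ (x ∈ V ∨ x = nb) ∨ x ∈ w := by
          intro x
          rw [hV₁, PySem.Set.mem_update, PySem.Set.mem_add]
        have hnd₁ : V₁.Nodup := PySem.Set.nodup_update _ _ (PySem.Set.nodup_add _ _ hnodup)
        have hVsub : ∀ x ∈ V, x ∈ V₁ := fun x hx => (hmemV₁ x).mpr (Or.inl (Or.inl hx))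
        obtain ⟨c1, c2, c3, c4, c5, c6, c7, c8⟩ := ih V₁ q hnd₁ hns'
        refine ⟨fun x hx => c1 x (hVsub x hx), c2, ?_, ?_, c5, c6, ?_, ?_⟩
        · intro x hx
          rcases c3 x hx with hx' | hx'
          · rcases (hmemV₁ x).mp hx' with (hx'' | hx'') | hx''
            · exact Or.inl hx''
            · exact Or.inr (hx'' ▸ hancnb)
            · exact Or.inr (Relation.TransGen.trans hancnb ((hwmem x).mp hx''))
          · exact Or.inr hx'
        · intro z hz
          rcases List.mem_cons.mp hz with hz' | hz'
          · exact hz' ▸ c1 nb ((hmemV₁ nb).mpr (Or.inl (Or.inr rfl)))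
          · exact c4 z hz'
        · intro x hx
          rcases c7 x hx with hx' | hx' | hx'
          · rcases (hmemV₁ x).mp hx' with (hx'' | hx'') | hx''
            · exact Or.inl hx''
            · subst hx''
              refine Or.inr (Or.inr ?_)
              intro z hz
              exact c1 z ((hmemV₁ z).mpr (Or.inr ((hwmem z).mpr (Relation.TransGen.single hz))))
            · refine Or.inr (Or.inr ?_)
              intro z hz
              refine c1 z ((hmemV₁ z).mpr (Or.inr ((hwmem z).mpr ?_)))
              exact Relation.TransGen.tail ((hwmem x).mp hx'') hz
          · exact Or.inr (Or.inl hx')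
          · exact Or.inr (Or.inr hx')
        · refine le_trans c8 ?_
          have : pvUnseen conns V₁ ≤ pvUnseen conns V := by
            unfold pvUnseen
            refine List.countP_mono_left ?_
            intro z _ hz
            simp only [Bool.not_eq_eq_eq_not, Bool.not_true, decide_eq_false_iff_not] at hz ⊢
            exact fun hzv => hz (hVsub z hzv)
          omega
      | none =>
        have hstepeq : pvInnerStep aff (V, q) nb = (PySem.Set.add V nb, q ++ [nb]) := by
          unfold pvInnerStep; rw [if_neg hmem, haff]
        rw [hstepeq]
        set V₁ := PySem.Set.add V nb with hV₁
        have hmemV₁ : ∀ x, x ∈ V₁ ↔ x ∈ V ∨ x = nb := fun x => PySem.Set.mem_add _ _ _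
        have hnd₁ : V₁.Nodup := PySem.Set.nodup_add _ _ hnodup
        have hVsub : ∀ x ∈ V, x ∈ V₁ := fun x hx => (hmemV₁ x).mpr (Or.inl hx)
        obtain ⟨c1, c2, c3, c4, c5, c6, c7, c8⟩ := ih V₁ (q ++ [nb]) hnd₁ hns'
        refine ⟨fun x hx => c1 x (hVsub x hx), c2, ?_, ?_, ?_, ?_, ?_, ?_⟩
        · intro x hx
          rcases c3 x hx with hx' | hx'
          · rcases (hmemV₁ x).mp hx' with hx'' | hx''
            · exact Or.inl hx''
            · exact Or.inr (hx'' ▸ hancnb)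
          · exact Or.inr hx'
        · intro z hz
          rcases List.mem_cons.mp hz with hz' | hz'
          · exact hz' ▸ c1 nb ((hmemV₁ nb).mpr (Or.inr rfl))
          · exact c4 z hz'
        · intro x hx
          rcases c5 x hx with hx' | hx'
          · rcases List.mem_append.mp hx' with hx'' | hx''
            · exact Or.inl hx''
            · simp only [List.mem_singleton] at hx''
              exact Or.inr (c1 x (hx'' ▸ (hmemV₁ nb).mpr (Or.inr rfl)))
          · exact Or.inr hx'
        · exact fun x hx => c6 x (List.mem_append_left _ hx)
        · intro x hx
          rcases c7 x hx with hx' | hx' | hx'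
          · rcases (hmemV₁ x).mp hx' with hx'' | hx''
            · exact Or.inl hx''
            · exact Or.inr (Or.inl (c6 x (hx'' ▸ List.mem_append_right _ (List.mem_singleton.mpr rfl))))
          · exact Or.inr (Or.inl hx')
          · exact Or.inr (Or.inr hx')
        · refine le_trans c8 ?_
          have hlt : pvUnseen conns V₁ < pvUnseen conns V := by
            unfold pvUnseen
            refine pvCountP_lt _ _ _ ?_ nb ?_ ?_ ?_
            · intro z _ hz
              simp only [Bool.not_eq_eq_eq_not, Bool.not_true, decide_eq_false_iff_not] at hz ⊢
              exact fun hzv => hz (hVsub z hzv)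
            · exact List.mem_filterMap.mpr ⟨[nb, node], hnbedge, rfl⟩
            · simp only [Bool.not_eq_eq_eq_not, Bool.not_true, decide_eq_false_iff_not]
              exact hmem
            · have hnbV₁ : nb ∈ V₁ := (hmemV₁ nb).mpr (Or.inr rfl)
              simp [hnbV₁]
          simp only [List.length_append, List.length_singleton]
          omega

lemma pvClosed_complete (conns : List (List Int)) (start : Int) (V : List Int)
    (hcl : ∀ x, (x = start ∨ x ∈ V) → ∀ z, [z, x] ∈ conns → z ∈ V) :
    ∀ y, pvAnc conns start y → y ∈ V := by
  intro y h
  induction h with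
  | @single b hb => exact hcl start (Or.inl rfl) b hb
  | @tail b c _ hstep ih => exact hcl b (Or.inr ih) c hstep

lemma pvBfs_spec (conns : List (List Int)) (hpre : ∀ c ∈ conns, c.length = 2)
    (aff : PySem.Dict Int (List Int)) (hmemo : pvMemoInv conns aff) (start : Int) :
    ∀ (fuel : Nat) (q : List Int) (V : PySem.Set Int), V.Nodup →
      (∀ x ∈ V, pvAnc conns start x) →
      (∀ x ∈ q, x = start ∨ x ∈ V) →
      (∀ x, (x = start ∨ x ∈ V) → x ∉ q → ∀ z, [z, x] ∈ conns → z ∈ V) →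
      q.length + pvUnseen conns V < fuel →
      (pvBfsLoop (conns.foldl pvAdjUpd PySem.Dict.empty) aff fuel q V).Nodup ∧
      (∀ y, y ∈ pvBfsLoop (conns.foldl pvAdjUpd PySem.Dict.empty) aff fuel q V ↔ pvAnc conns start y) := by
  intro fuel
  induction fuel with
  | zero => intro q V _ _ _ _ hfuel; omega
  | succ fuel ih =>
    intro q V hnodup hI2 hI3 hI4 hfuel
    match q with
    | [] =>
      have hres : pvBfsLoop (conns.foldl pvAdjUpd PySem.Dict.empty) aff (fuel + 1) [] V = V := rfl
      rw [hres]
      refine ⟨hnodup, fun y => ⟨hI2 y, ?_⟩⟩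
      exact pvClosed_complete conns start V
        (fun x hx z hz => hI4 x hx (List.not_mem_nil) z hz) y
    | node :: rest =>
      have hadjiff : ∀ j z, z ∈ (conns.foldl pvAdjUpd PySem.Dict.empty).getD j [] ↔ [z, j] ∈ conns := by
        intro j z
        rw [pvAdj_mem conns hpre PySem.Dict.empty j z]
        simp [PySem.Dict.getD_empty]
      have hnodeV : node = start ∨ node ∈ V := hI3 node (List.mem_cons_self ..)
      have hnode : ∀ z, [z, node] ∈ conns → pvAnc conns start z := by
        intro z hz
        rcases hnodeV with h | h
        · exact Relation.TransGen.single (h ▸ hz)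
        · exact Relation.TransGen.tail (hI2 node h) hz
      have hns : ∀ z ∈ (conns.foldl pvAdjUpd PySem.Dict.empty).getD node [],
          [z, node] ∈ conns := fun z hz => (hadjiff node z).mp hz
      obtain ⟨c1, c2, c3, c4, c5, c6, c7, c8⟩ :=
        pvInner_spec conns aff start node hmemo hnode
          ((conns.foldl pvAdjUpd PySem.Dict.empty).getD node []) V rest hnodup hns
      set s := ((conns.foldl pvAdjUpd PySem.Dict.empty).getD node []).foldl
        (pvInnerStep aff) (V, rest) with hs
      have hres : pvBfsLoop (conns.foldl pvAdjUpd PySem.Dict.empty) aff (fuel + 1) (node :: rest) V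
          = pvBfsLoop (conns.foldl pvAdjUpd PySem.Dict.empty) aff fuel s.2 s.1 := rfl
      rw [hres]
      refine ih s.2 s.1 c2 ?_ ?_ ?_ ?_
      · intro x hx
        rcases c3 x hx with hx' | hx'
        · exact hI2 x hx'
        · exact hx'
      · intro x hx
        rcases c5 x hx with hx' | hx'
        · rcases hI3 x (List.mem_cons_of_mem _ hx') with h | h
          · exact Or.inl h
          · exact Or.inr (c1 x h)
        · exact Or.inr hx'
      · intro x hx hxs z hz
        rcases hx with hx | hx
        · by_cases hxn : x = node
          · exact c4 z ((hadjiff node z).mpr (hxn ▸ hz))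
          · by_cases hxV : x ∈ V
            · have hxq : x ∉ node :: rest := by
                intro hmem
                rcases List.mem_cons.mp hmem with h | h
                · exact hxn h
                · exact hxs (c6 x h)
              exact c1 z (hI4 x (Or.inr hxV) hxq z hz)
            · have hxq : x ∉ node :: rest := by
                intro hmem
                rcases List.mem_cons.mp hmem with h | h
                · exact hxn h
                · exact hxs (c6 x h)
              exact c1 z (hI4 x (Or.inl hx) hxq z hz)
        · rcases c7 x hx with hx' | hx' | hx'
          · by_cases hxn : x = node
            · exact c4 z ((hadjiff node z).mpr (hxn ▸ hz))
            · have hxq : x ∉ node :: rest := by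
                intro hmem
                rcases List.mem_cons.mp hmem with h | h
                · exact hxn h
                · exact hxs (c6 x h)
              exact c1 z (hI4 x (Or.inr hx') hxq z hz)
          · exact absurd hx' hxs
          · exact hx' z hz
      · have : (node :: rest).length = rest.length + 1 := rfl
        omega

lemma pvInfluencedBfs_spec (conns : List (List Int)) (hpre : ∀ c ∈ conns, c.length = 2)
    (aff : PySem.Dict Int (List Int)) (hmemo : pvMemoInv conns aff) (start : Int) :
    (∃ u : List Int, u.Nodup ∧ (∀ x, x ∈ u ↔ pvAnc conns start x) ∧
      (pvInfluencedBfs (conns.foldl pvAdjUpd PySem.Dict.empty) aff (conns.length + 2) start).1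
        = PySem.List.sorted u (fun x => x) false) ∧
    pvMemoInv conns (pvInfluencedBfs (conns.foldl pvAdjUpd PySem.Dict.empty) aff (conns.length + 2) start).2 := by
  cases haff : aff.get? start with
  | some v =>
    have hres : pvInfluencedBfs (conns.foldl pvAdjUpd PySem.Dict.empty) aff (conns.length + 2) start
        = (v, aff) := by
      unfold pvInfluencedBfs; rw [haff]
    rw [hres]
    exact ⟨hmemo start v haff, hmemo⟩
  | none =>
    have hbfs := pvBfs_spec conns hpre aff hmemo start (conns.length + 2) [start]
      PySem.Set.empty (by simp [PySem.Set.empty]) (by simp [PySem.Set.empty])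
      (by intro x hx; simp only [List.mem_singleton] at hx; exact Or.inl hx)
      (by
        intro x hx hxq z hz
        rcases hx with hx | hx
        · exact absurd (List.mem_singleton.mpr hx) hxq
        · simp [PySem.Set.empty] at hx)
      (by
        have h1 : pvUnseen conns PySem.Set.empty ≤ conns.length :=
          le_trans List.countP_le_length (List.length_filterMap_le _ _)
        simp only [List.length_singleton]
        omega)
    obtain ⟨hnd, hiff⟩ := hbfs
    set R := pvBfsLoop (conns.foldl pvAdjUpd PySem.Dict.empty) aff (conns.length + 2) [start]
      PySem.Set.empty with hR
    have hres : pvInfluencedBfs (conns.foldl pvAdjUpd PySem.Dict.empty) aff (conns.length + 2) start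
        = (PySem.List.sorted (PySem.Set.ofList R) (fun x => x) false,
           aff.insert start (PySem.List.sorted (PySem.Set.ofList R) (fun x => x) false)) := by
      unfold pvInfluencedBfs; rw [haff]
    rw [hres]
    have hofl : PySem.Set.ofList R = R := PySem.Set.ofList_eq_self_of_nodup R hnd
    refine ⟨⟨R, hnd, hiff, by rw [hofl]⟩, ?_⟩
    intro k v hk
    rw [PySem.Dict.get?_insert] at hk
    split at hk
    · next hks =>
      subst hks
      refine ⟨R, hnd, hiff, ?_⟩
      rw [← hofl]
      exact (Option.some.injEq _ _ ▸ hk).symm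
    · exact hmemo k v hk

lemma pvOuter_fold (conns : List (List Int)) (hpre : ∀ c ∈ conns, c.length = 2) :
    ∀ (rs : List Int) (acc : List (List Int)) (aff : PySem.Dict Int (List Int)),
      pvMemoInv conns aff →
      (rs.foldl
        (fun acc i =>
          let p := pvInfluencedBfs (conns.foldl pvAdjUpd PySem.Dict.empty) acc.2 (conns.length + 2) i
          (acc.1 ++ [p.1], p.2)) (acc, aff)).1
      = acc ++ rs.map (fun v =>
          PySem.List.sorted (pvAg (pvSweeps conns conns.length) v) (fun x => x) false) := by
  intro rs
  induction rs with
  | nil => intro acc aff _; simp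
  | cons i rs ih =>
    intro acc aff hmemo
    rw [List.foldl_cons, List.map_cons]
    obtain ⟨⟨u, hu, hiff, hp1⟩, hmemo'⟩ := pvInfluencedBfs_spec conns hpre aff hmemo i
    obtain ⟨hwnd, hwiff⟩ := pvAlt_entry conns i
    have hentry : (pvInfluencedBfs (conns.foldl pvAdjUpd PySem.Dict.empty) aff
        (conns.length + 2) i).1
        = PySem.List.sorted (pvAg (pvSweeps conns conns.length) i) (fun x => x) false := by
      rw [hp1]
      exact pv_sorted_eq_of_mem_iff hu hwnd (fun x => (hiff x).trans (hwiff x).symm)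
    rw [ih _ _ hmemo', hentry]
    simp

-- ===== VERDICT (by name: the statement is the Claim_ definition above) =====
theorem influencer_network_spec : Claim_equal_influencer_network := by
  intro n conns _ hpre
  unfold Spec_influencer_network influencer_network influencer_network_alt
  have hmemo0 : pvMemoInv conns PySem.Dict.empty := by
    intro k v hk
    rw [PySem.Dict.get?_empty] at hk
    simp at hk
  have h := pvOuter_fold conns hpre (PySem.List.pyRange 0 n 1) [] PySem.Dict.empty hmemo0
  simp only [List.nil_append] at h
  exact h
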